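-- pv_equiv track=rewrite | github.com/xiasma/evagene2.0 | api/evagene/gedcom.py | _collect_notes
-- ===== SOURCE A (Python) =====
-- def _collect_notes(record: list[tuple[int, str, str, str]]) -> str:
--     """Collect NOTE with CONT/CONC continuation lines."""
--     parts: list[str] = []
--     in_note = False
--     for lvl, _, t, v in record:
--         if lvl == 1 and t == "NOTE":
--             in_note = True
--             parts.append(v)
--         elif in_note and lvl == 2 and t == "CONT":
--             parts.append("\n" + v)
--         elif in_note and lvl == 2 and t == "CONC":
--             parts.append(v)
--         elif lvl == 1:
--             in_note = False
--     return "".join(parts)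
-- ===== SOURCE B (Python) =====
-- def _collect_notes(record: list[tuple[int, str, str, str]]) -> str:
--     """Collect NOTE with CONT/CONC continuation lines."""
--     parts: list[str] = []
--     i = 0
--     n = len(record)
--     while i < n:
--         lvl, _, t, v = record[i]
--         if lvl == 1 and t == "NOTE":
--             parts.append(v)
--             i += 1
--             # consume continuation lines until the next level-1 line,
--             # which the outer loop re-examines
--             while i < n:
--                 l2, _, t2, v2 = record[i]
--                 if l2 == 1:
--                     break
--                 if l2 == 2 and t2 == "CONT":
--                     parts.append("\n" + v2)
--                 elif l2 == 2 and t2 == "CONC":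
--                     parts.append(v2)
--                 i += 1
--         else:
--             i += 1
--     return "".join(parts)
-- ===== Notes on version B (the rewrite author's own statement) =====
-- stated objective: alternative
-- what changed: Replaced the single-pass boolean state machine (in_note flag) by nested outer/inner loops: the outer loop scans for a level-1 NOTE line, the inner loop consumes its CONT/CONC continuations and stops at the next level-1 line, which the outer loop re-examines.
import Mathlib
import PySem

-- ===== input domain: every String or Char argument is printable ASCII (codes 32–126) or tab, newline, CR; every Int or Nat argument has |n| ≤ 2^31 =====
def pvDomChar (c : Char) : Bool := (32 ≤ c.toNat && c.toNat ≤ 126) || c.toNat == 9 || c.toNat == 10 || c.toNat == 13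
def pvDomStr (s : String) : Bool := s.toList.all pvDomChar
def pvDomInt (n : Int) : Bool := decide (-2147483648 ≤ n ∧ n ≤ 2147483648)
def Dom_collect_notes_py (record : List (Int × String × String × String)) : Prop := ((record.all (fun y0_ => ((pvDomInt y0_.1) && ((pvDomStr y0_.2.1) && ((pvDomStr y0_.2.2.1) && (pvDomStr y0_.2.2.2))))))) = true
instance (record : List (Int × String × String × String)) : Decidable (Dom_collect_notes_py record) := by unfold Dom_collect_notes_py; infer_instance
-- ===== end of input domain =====

-- B reshapes A's single-pass boolean state machine into nested outer/inner loops over suffixes;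
-- objective: alternative decomposition (same cost).


-- ===== PORT A =====
-- flat fold carrying (parts, in_note), branch order as in the Python
def collect_notes_py (record : List (Int × String × String × String)) : String :=
  PySem.Str.join "" (record.foldl (fun (st : List String × Bool) x =>
    let parts := st.1
    let in_note := st.2
    let lvl := x.1
    let t := x.2.2.1
    let v := x.2.2.2
    if lvl = 1 ∧ t = "NOTE" then (parts ++ [v], true)
    else if in_note = true ∧ lvl = 2 ∧ t = "CONT" then (parts ++ ["\n" ++ v], in_note)
    else if in_note = true ∧ lvl = 2 ∧ t = "CONC" then (parts ++ [v], in_note)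
    else if lvl = 1 then (parts, false)
    else (parts, in_note)) ([], false)).1

-- ===== PORT B =====
-- inner while loop: collects continuations, returns them plus the unconsumed suffix
-- (starting at the breaking level-1 line)
def pvInner : List (Int × String × String × String) →
    List String × List (Int × String × String × String)
  | [] => ([], [])
  | x :: rest =>
    if x.1 = 1 then ([], x :: rest)
    else if x.1 = 2 ∧ x.2.2.1 = "CONT" then
      let r := pvInner rest
      (("\n" ++ x.2.2.2) :: r.1, r.2)
    else if x.1 = 2 ∧ x.2.2.1 = "CONC" then
      let r := pvInner rest
      (x.2.2.2 :: r.1, r.2)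
    else
      pvInner rest

theorem pvInner_len (l : List (Int × String × String × String)) :
    (pvInner l).2.length ≤ l.length := by
  induction l with
  | nil => simp [pvInner]
  | cons x rest ih =>
    simp only [pvInner]
    split_ifs <;> simp <;> omega

-- outer while loop: scans for a level-1 NOTE, emits its value and the inner loop's parts,
-- then continues from the suffix the inner loop left (re-examining the breaking line)
def pvOuter : List (Int × String × String × String) → List String
  | [] => []
  | x :: rest =>
    if x.1 = 1 ∧ x.2.2.1 = "NOTE" then
      let r := pvInner rest
      x.2.2.2 :: (r.1 ++ pvOuter r.2)
    else
      pvOuter rest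
termination_by l => l.length
decreasing_by
  · have := pvInner_len rest; simp; omega
  · simp

def collect_notes_py_alt (record : List (Int × String × String × String)) : String :=
  PySem.Str.join "" (pvOuter record)

-- ===== PRECONDITION & SPEC =====
def Spec_collect_notes_py (record : List (Int × String × String × String)) (out : String) : Prop := out = collect_notes_py_alt record
instance (record : List (Int × String × String × String)) (out : String) : Decidable (Spec_collect_notes_py record out) := by unfold Spec_collect_notes_py; infer_instance

-- ===== CLAIM (what is proved, stated in full; the proofs are below) =====
def Claim_equal_collect_notes_py : Prop := ∀ (record : List (Int × String × String × String)), Dom_collect_notes_py record → Spec_collect_notes_py record (collect_notes_py record)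

-- ===== LEMMAS AND PROOFS =====

-- the list of parts A's fold produces from `l` when started with flag `b`
def pvFoldA (b : Bool) : List (Int × String × String × String) → List String
  | [] => []
  | x :: rest =>
    if x.1 = 1 ∧ x.2.2.1 = "NOTE" then x.2.2.2 :: pvFoldA true rest
    else if b = true ∧ x.1 = 2 ∧ x.2.2.1 = "CONT" then ("\n" ++ x.2.2.2) :: pvFoldA b rest
    else if b = true ∧ x.1 = 2 ∧ x.2.2.1 = "CONC" then x.2.2.2 :: pvFoldA b rest
    else if x.1 = 1 then pvFoldA false rest
    else pvFoldA b rest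

theorem pvFoldA_spec (l : List (Int × String × String × String))
    (acc : List String) (b : Bool) :
    (l.foldl (fun (st : List String × Bool) x =>
      let parts := st.1
      let in_note := st.2
      let lvl := x.1
      let t := x.2.2.1
      let v := x.2.2.2
      if lvl = 1 ∧ t = "NOTE" then (parts ++ [v], true)
      else if in_note = true ∧ lvl = 2 ∧ t = "CONT" then (parts ++ ["\n" ++ v], in_note)
      else if in_note = true ∧ lvl = 2 ∧ t = "CONC" then (parts ++ [v], in_note)
      else if lvl = 1 then (parts, false)
      else (parts, in_note)) (acc, b)).1 = acc ++ pvFoldA b l := by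
  induction l generalizing acc b with
  | nil => simp [pvFoldA]
  | cons x rest ih =>
    simp only [List.foldl_cons, pvFoldA]
    split_ifs <;> simp [ih]

-- the key correspondence between A's state machine and B's nested loops
theorem pvOuter_nil : pvOuter [] = [] := by
  rw [pvOuter.eq_def]

theorem pvOuter_cons (x : Int × String × String × String)
    (rest : List (Int × String × String × String)) :
    pvOuter (x :: rest) =
      if x.1 = 1 ∧ x.2.2.1 = "NOTE" then
        x.2.2.2 :: ((pvInner rest).1 ++ pvOuter (pvInner rest).2)
      else pvOuter rest := by
  rw [pvOuter.eq_def]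

-- the key correspondence between A's state machine and B's nested loops
theorem pvFoldA_outer (l : List (Int × String × String × String)) :
    pvFoldA false l = pvOuter l ∧
    pvFoldA true l = (pvInner l).1 ++ pvOuter (pvInner l).2 := by
  induction l with
  | nil => simp [pvFoldA, pvOuter_nil, pvInner]
  | cons x rest ih =>
    obtain ⟨ihf, iht⟩ := ih
    by_cases h1 : x.1 = 1
    · by_cases hn : x.2.2.1 = "NOTE"
      · simp [pvFoldA, pvOuter_cons, pvInner, h1, hn, iht]
      · simp [pvFoldA, pvOuter_cons, pvInner, h1, hn, ihf]
    · refine ⟨by simp [pvFoldA, pvOuter_cons, h1, ihf], ?_⟩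
      by_cases hc : x.2.2.1 = "CONT"
      · by_cases h2 : x.1 = 2 <;> simp [pvFoldA, pvInner, h1, h2, hc, iht]
      · by_cases hcc : x.2.2.1 = "CONC"
        · by_cases h2 : x.1 = 2 <;> simp [pvFoldA, pvInner, h1, h2, hcc, iht]
        · simp [pvFoldA, pvInner, h1, hc, hcc, iht]

-- ===== VERDICT (by name: the statement is the Claim_ definition above) =====
theorem collect_notes_py_spec : Claim_equal_collect_notes_py := by
  intro record _
  unfold Spec_collect_notes_py collect_notes_py collect_notes_py_alt
  rw [pvFoldA_spec record [] false]
  rw [(pvFoldA_outer record).1]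
  simp
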